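-- pv_equiv track=rewrite | github.com/Gaoce8888/aidult | screenshot_verification/core/detectors.py | _detect_suspicious_characters
-- ===== SOURCE A (Python) =====
-- from typing import Dict, List, Tuple, Optional, Any
--
-- def _detect_suspicious_characters(text: str) -> List[str]:
--     """检测可疑字符"""
--     suspicious = []
--
--     # 检测特殊字符
--     special_chars = ['@', '#', '$', '%', '&', '*', '!', '?']
--     for char in special_chars:
--         if char in text:
--             suspicious.append(char)
--
--     # 检测重复字符
--     for i in range(len(text) - 2):
--         if text[i] == text[i+1] == text[i+2]:
--             suspicious.append(f"重复字符: {text[i]}")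
--
--     return suspicious
-- ===== SOURCE B (Python) =====
-- def _detect_suspicious_characters(text: str) -> list:
--     """检测可疑字符"""
--     suspicious = [c for c in '@#$%&*!?' if c in text]
--     # run-length scan: a run of length L contributes max(0, L-2) repeat reports
--     i = 0
--     n = len(text)
--     while i < n:
--         j = i
--         while j < n and text[j] == text[i]:
--             j += 1
--         suspicious.extend(f"重复字符: {text[i]}" for _ in range(j - i - 2))
--         i = j
--     return suspicious
-- ===== Notes on version B (the rewrite author's own statement) =====
-- stated objective: alternative
-- what changed: The index-by-index sliding triple comparison is replaced by a run-length scan: each maximal run of an identical character of length L contributes max(0, L-2) repeat reports, preserving order.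
import Mathlib
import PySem

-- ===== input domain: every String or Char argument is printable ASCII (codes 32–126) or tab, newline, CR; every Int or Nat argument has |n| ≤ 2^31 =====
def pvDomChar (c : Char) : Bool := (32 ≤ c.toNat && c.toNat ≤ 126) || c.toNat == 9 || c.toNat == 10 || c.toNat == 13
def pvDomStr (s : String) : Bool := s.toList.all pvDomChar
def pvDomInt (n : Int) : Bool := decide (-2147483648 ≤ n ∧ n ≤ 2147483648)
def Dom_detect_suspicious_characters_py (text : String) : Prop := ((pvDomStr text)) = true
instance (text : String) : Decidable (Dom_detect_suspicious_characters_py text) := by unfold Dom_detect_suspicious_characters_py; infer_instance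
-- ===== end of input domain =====

-- B replaces A's sliding three-index comparison by a run-length scan (each maximal run of
-- length L contributes L-2 repeat reports); an alternative decomposition, not claimed faster.


-- ===== PORT A =====
-- literal port: specials appended by a membership loop, then for i in range(len(text)-2)
-- compare text[i]==text[i+1]==text[i+2] (indices are always in range, so the option match
-- is exact: the fallthrough arm is never taken).
def detect_suspicious_characters_py (text : String) : List String :=
  let cs := text.toList
  let suspicious := (['@', '#', '$', '%', '&', '*', '!', '?']).foldl
    (fun acc ch => if PySem.Chars.isIn [ch] cs then acc ++ [String.ofList [ch]] else acc) []
  (List.range (cs.length - 2)).foldl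
    (fun acc i =>
      match cs[i]?, cs[i+1]?, cs[i+2]? with
      | some x, some y, some z =>
          if x = y ∧ y = z then acc ++ ["重复字符: " ++ String.ofList [x]] else acc
      | _, _, _ => acc) suspicious

-- ===== PORT B =====
-- run-length scan: split off the maximal run of the head character, emit (L-2) reports.
def pvRunScan : List Char → List String
  | [] => []
  | a :: t =>
      List.replicate ((t.takeWhile (· == a)).length + 1 - 2) ("重复字符: " ++ String.ofList [a])
        ++ pvRunScan (t.dropWhile (· == a))
termination_by l => l.length
decreasing_by simpa using Nat.lt_succ_of_le (List.length_dropWhile_le _ _)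

def detect_suspicious_characters_py_alt (text : String) : List String :=
  let cs := text.toList
  (("@#$%&*!?".toList).filter (fun c => PySem.Chars.isIn [c] cs)).map (fun c => String.ofList [c])
    ++ pvRunScan cs

-- ===== PRECONDITION & SPEC =====
def Spec_detect_suspicious_characters_py (text : String) (out : List String) : Prop := out = detect_suspicious_characters_py_alt text
instance (text : String) (out : List String) : Decidable (Spec_detect_suspicious_characters_py text out) := by unfold Spec_detect_suspicious_characters_py; infer_instance

-- ===== CLAIM (what is proved, stated in full; the proofs are below) =====
def Claim_equal_detect_suspicious_characters_py : Prop := ∀ (text : String), Dom_detect_suspicious_characters_py text → Spec_detect_suspicious_characters_py text (detect_suspicious_characters_py text)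

-- ===== LEMMAS AND PROOFS =====

-- canonical form of the repeated-character part: one step per index
def pvTriples : List Char → List String
  | a :: b :: c :: t =>
      (if a = b ∧ b = c then ["重复字符: " ++ String.ofList [a]] else []) ++ pvTriples (b :: c :: t)
  | _ => []

-- A's index loop body as a flatMap payload
def pvHit (cs : List Char) (i : Nat) : List String :=
  match cs[i]?, cs[i+1]?, cs[i+2]? with
  | some x, some y, some z => if x = y ∧ y = z then ["重复字符: " ++ String.ofList [x]] else []
  | _, _, _ => []

theorem pvA_loop_eq_triples (cs : List Char) :
    (List.range (cs.length - 2)).flatMap (pvHit cs) = pvTriples cs := by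
  induction cs with
  | nil => simp [pvTriples]
  | cons a t ih =>
    match t with
    | [] => simp [pvTriples]
    | [b] => simp [pvTriples]
    | b :: c :: t' =>
      have hlen : (a :: b :: c :: t').length - 2 = t'.length + 1 := by simp
      rw [hlen, List.range_succ_eq_map, List.flatMap_cons, List.flatMap_map]
      have hshift : ∀ i : Nat, pvHit (a :: b :: c :: t') (i + 1) = pvHit (b :: c :: t') i := by
        intro i; simp [pvHit]
      simp only [Nat.succ_eq_add_one, hshift]
      have htail : (List.range t'.length).flatMap (fun i => pvHit (b :: c :: t') i)
          = pvTriples (b :: c :: t') := by simpa using ih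
      rw [htail]
      simp [pvTriples, pvHit]

theorem pvTriples_run (a : Char) (t : List Char) :
    pvTriples (a :: t)
      = List.replicate ((t.takeWhile (· == a)).length + 1 - 2) ("重复字符: " ++ String.ofList [a])
          ++ pvTriples (t.dropWhile (· == a)) := by
  induction t with
  | nil => simp [pvTriples]
  | cons b t' ih =>
    by_cases hba : b = a
    · subst hba
      simp only [List.takeWhile_cons, List.dropWhile_cons, beq_self_eq_true, if_pos] at ih ⊢
      match t' with
      | [] => simp [pvTriples]
      | c :: t'' =>
        by_cases hcb : c = b
        · subst hcb
          simp only [List.takeWhile_cons, List.dropWhile_cons, beq_self_eq_true, if_pos] at ih ⊢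
          rw [show pvTriples (c :: c :: c :: t'')
                = ["重复字符: " ++ String.ofList [c]] ++ pvTriples (c :: c :: t'') by
              simp [pvTriples], ih]
          simp [List.replicate_succ]
        · have hbeq : (c == b) = false := by simp [hcb]
          simp only [List.takeWhile_cons, List.dropWhile_cons, hbeq] at ih ⊢
          simp only [Bool.false_eq_true, if_false] at ih ⊢
          have hbc : ¬ b = c := fun h => hcb h.symm
          rw [show pvTriples (b :: b :: c :: t'') = pvTriples (b :: c :: t'') by
              simp [pvTriples, hbc], ih]
          simp
    · have hbeq : (b == a) = false := by simp [hba]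
      simp only [List.takeWhile_cons, List.dropWhile_cons, hbeq, Bool.false_eq_true, if_false]
      match t' with
      | [] => simp [pvTriples]
      | c :: t'' =>
        have hab : ¬ a = b := fun h => hba h.symm
        rw [show pvTriples (a :: b :: c :: t'') = pvTriples (b :: c :: t'') by
            simp [pvTriples, hab]]
        simp

theorem pvRunScan_eq_triples (cs : List Char) : pvRunScan cs = pvTriples cs := by
  induction cs using pvRunScan.induct with
  | case1 => simp [pvRunScan, pvTriples]
  | case2 a t ih => rw [pvRunScan, pvTriples_run, ih]

-- ===== VERDICT (by name: the statement is the Claim_ definition above) =====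
theorem detect_suspicious_characters_py_spec : Claim_equal_detect_suspicious_characters_py := by
  intro text _
  unfold Spec_detect_suspicious_characters_py detect_suspicious_characters_py detect_suspicious_characters_py_alt
  dsimp only
  rw [PySem.List.foldl_append_if]
  have hbody : (fun (acc : List String) (i : Nat) =>
      match text.toList[i]?, text.toList[i+1]?, text.toList[i+2]? with
      | some x, some y, some z =>
          if x = y ∧ y = z then acc ++ ["重复字符: " ++ String.ofList [x]] else acc
      | _, _, _ => acc)
      = fun acc i => acc ++ pvHit text.toList i := by
    funext acc i
    simp only [pvHit]
    rcases text.toList[i]? with _ | u <;> rcases text.toList[i+1]? with _ | v <;>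
      rcases text.toList[i+2]? with _ | w <;> (simp; try (split <;> simp))
  rw [hbody, PySem.List.foldl_append_eq_flatMap, pvA_loop_eq_triples, pvRunScan_eq_triples]
  congr 1
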